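-- pv_equiv track=rewrite | github.com/miliar/Code_Jam_Webscraper | solutions_python/Problem_155/1173.py | solve
-- ===== SOURCE A (Python) =====
-- def solve(max_shyness, audience):
-- 	persons_to_add = 0
-- 	persons_clapping = 0
--
-- 	for i in range(0, len(audience)):
-- 		shyness_level = i
-- 		persons = int(audience[i])
--
-- 		if persons_clapping < shyness_level:
-- 			persons_needed = shyness_level - persons_clapping
-- 			persons_to_add += persons_needed
-- 			persons_clapping += persons_needed
--
-- 		persons_clapping += persons
--
-- 	return persons_to_add
-- ===== SOURCE B (Python) =====
-- def solve(max_shyness, audience):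
--     # Stage 1: prefixes[i] = number of people with shyness < i (prefix sums).
--     prefixes = []
--     total = 0
--     for persons in audience:
--         prefixes.append(total)
--         total += int(persons)
--     # Stage 2: the answer is the worst deficit i - prefixes[i], clamped at 0.
--     best = 0
--     for i, p in enumerate(prefixes):
--         if i - p > best:
--             best = i - p
--     return best
-- ===== Notes on version B (the rewrite author's own statement) =====
-- stated objective: alternative
-- what changed: B does not simulate adding friends with a running clapping total; it first builds the prefix-sum list of the audience and then scans it for the maximum deficit i - prefix_i (clamped at 0), which equals A's accumulated additions.
import Mathlib
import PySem

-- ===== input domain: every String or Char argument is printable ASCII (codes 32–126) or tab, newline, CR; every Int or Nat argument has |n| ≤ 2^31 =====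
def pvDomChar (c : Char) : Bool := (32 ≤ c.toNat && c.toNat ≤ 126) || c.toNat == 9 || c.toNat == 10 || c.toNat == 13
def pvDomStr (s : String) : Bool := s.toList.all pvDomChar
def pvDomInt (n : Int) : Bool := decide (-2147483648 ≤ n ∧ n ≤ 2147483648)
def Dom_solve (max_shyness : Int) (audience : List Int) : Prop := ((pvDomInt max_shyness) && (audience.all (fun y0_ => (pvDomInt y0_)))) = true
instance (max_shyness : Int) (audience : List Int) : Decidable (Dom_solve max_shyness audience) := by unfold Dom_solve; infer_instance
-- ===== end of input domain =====

-- B replaces A's one-pass simulation of added friends by two staged passes: build the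
-- prefix-sum list, then scan it for the worst deficit i - prefix_i (clamped at 0); same O(n) cost.

-- ===== PORT A =====
-- A: iterative simulation, state = (persons_to_add, persons_clapping); top up whenever clapping < i.
def solve (max_shyness : Int) (audience : List Int) : Int :=
  (((PySem.List.enumerate audience 0).foldl
      (fun (s : Int × Int) (p : Int × Int) =>
        let shyness_level := p.1
        let persons := p.2
        let s :=
          if s.2 < shyness_level then
            (s.1 + (shyness_level - s.2), s.2 + (shyness_level - s.2))
          else s
        (s.1, s.2 + persons))
      (0, 0))).1

-- ===== PORT B =====
-- B stage 1: the prefix-sum list (state = (prefixes, total)).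
def solve_alt (max_shyness : Int) (audience : List Int) : Int :=
  let prefixes :=
    (audience.foldl (fun (s : List Int × Int) persons => (s.1 ++ [s.2], s.2 + persons))
      ([], 0)).1
  -- B stage 2: worst deficit i - prefixes[i], starting from 0.
  (PySem.List.enumerate prefixes 0).foldl
    (fun best ip => if ip.1 - ip.2 > best then ip.1 - ip.2 else best) 0

-- ===== PRECONDITION & SPEC =====
def Spec_solve (max_shyness : Int) (audience : List Int) (out : Int) : Prop := out = solve_alt max_shyness audience
instance (max_shyness : Int) (audience : List Int) (out : Int) : Decidable (Spec_solve max_shyness audience out) := by unfold Spec_solve; infer_instance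

-- ===== CLAIM (what is proved, stated in full; the proofs are below) =====
def Claim_equal_solve : Prop := ∀ (max_shyness : Int) (audience : List Int), Dom_solve max_shyness audience → Spec_solve max_shyness audience (solve max_shyness audience)

-- ===== LEMMAS AND PROOFS =====

-- Reference form of B's stage-1 list: the running prefix sums starting at t.
def scanPrefix : List Int → Int → List Int
  | [], _ => []
  | x :: rest, t => t :: scanPrefix rest (t + x)

-- B's stage-1 fold produces acc ++ scanPrefix l t.
theorem stage1_eq (l : List Int) :
    ∀ (acc : List Int) (t : Int),
      (l.foldl (fun (s : List Int × Int) persons => (s.1 ++ [s.2], s.2 + persons)) (acc, t)).1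
      = acc ++ scanPrefix l t := by
  induction l with
  | nil => intro acc t; simp [scanPrefix]
  | cons x rest ih =>
      intro acc t
      simp only [List.foldl_cons, scanPrefix]
      rw [ih]
      simp

-- Core invariant: with c = pfx + t, A's fold from (t, c) equals B's stage-2 max fold
-- from t over the enumerated prefix sums starting at pfx.
theorem fold_eq (l : List Int) :
    ∀ (i t c pfx : Int), c = pfx + t →
      ((PySem.List.enumerate l i).foldl
        (fun (s : Int × Int) (p : Int × Int) =>
          let shyness_level := p.1
          let persons := p.2
          let s :=
            if s.2 < shyness_level then
              (s.1 + (shyness_level - s.2), s.2 + (shyness_level - s.2))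
            else s
          (s.1, s.2 + persons)) (t, c)).1
      =
      (PySem.List.enumerate (scanPrefix l pfx) i).foldl
        (fun best ip => if ip.1 - ip.2 > best then ip.1 - ip.2 else best) t := by
  induction l with
  | nil =>
      intro i t c pfx hc
      simp [scanPrefix, PySem.List.enumerate_nil]
  | cons x rest ih =>
      intro i t c pfx hc
      simp only [scanPrefix, PySem.List.enumerate_cons, List.foldl_cons]
      by_cases h : c < i
      · rw [if_pos h, if_pos (by omega : i - pfx > t)]
        have : t + (i - c) = i - pfx := by omega
        rw [this]
        exact ih (i + 1) (i - pfx) (c + (i - c) + x) (pfx + x) (by omega)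
      · rw [if_neg h, if_neg (by omega : ¬ i - pfx > t)]
        exact ih (i + 1) t (c + x) (pfx + x) (by omega)

-- ===== VERDICT (by name: the statement is the Claim_ definition above) =====
theorem solve_spec : Claim_equal_solve := by
  intro ms aud _
  unfold Spec_solve solve solve_alt
  rw [stage1_eq aud [] 0, List.nil_append]
  exact fold_eq aud 0 0 0 0 (by omega)
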